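-- pv_equiv track=rewrite | github.com/SamuelGong/LeetHub | 0015-3sum/0015-3sum.py | no_zero
-- ===== SOURCE A (Python) =====
-- def no_zero(neg, pos):
--     result = set()
--
--     # two negative
--     if len(neg) > 1:
--         temp = {}
--         for idx, i in enumerate(neg[:-1]):
--             for _, j in enumerate(neg[idx+1:]):
--                 two_sum = i + j
--                 if two_sum not in temp:
--                     temp[two_sum] = [[i, j]]
--                 else:
--                     temp[two_sum] += [[i, j]]
--
--         k_start_idx = len(pos) - 1
--         for two_sum in sorted(list(temp.keys())):
--             for idx in range(k_start_idx, -1, -1):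
--                 k = pos[idx]
--                 if k > -two_sum:
--                     continue
--                 else:
--                     if k == -two_sum:
--                         for i, j in temp[two_sum]:
--                             result.add((i, j, k))
--                     k_start_idx = idx
--                     break
--     # two positive
--     if len(pos) > 1:
--         temp = {}
--         for idx, i in enumerate(pos[:-1]):
--             for _, j in enumerate(pos[idx+1:]):
--                 two_sum = i + j
--                 if two_sum not in temp:
--                     temp[two_sum] = [[i, j]]
--                 else:
--                     temp[two_sum] += [[i, j]]
--
--         k_start_idx = len(neg) - 1
--         for two_sum in sorted(list(temp.keys())):
--             for idx in range(k_start_idx, -1, -1):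
--                 k = neg[idx]
--                 if k > -two_sum:
--                     continue
--                 else:
--                     if k == -two_sum:
--                         for i, j in temp[two_sum]:
--                             result.add((k, i, j))
--                     k_start_idx = idx
--                     break
--
--     return result
-- ===== SOURCE B (Python) =====
-- def _pair_sums(side):
--     sums = {}
--     for a in range(len(side) - 1):
--         x = side[a]
--         for y in side[a + 1:]:
--             sums.setdefault(x + y, []).append((x, y))
--     return sums
--
--
-- def _last_at_most(values, bound):
--     """Rightmost element of values not exceeding bound (None if all are larger)."""
--     for v in reversed(values):
--         if v <= bound:
--             return v
--     return None
--
--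
-- def no_zero(neg, pos):
--     result = set()
--     neg_sums = _pair_sums(neg)
--     for s in sorted(neg_sums):
--         if _last_at_most(pos, -s) == -s:
--             result.update((i, j, -s) for i, j in neg_sums[s])
--     pos_sums = _pair_sums(pos)
--     for s in sorted(pos_sums):
--         if _last_at_most(neg, -s) == -s:
--             result.update((-s, i, j) for i, j in pos_sums[s])
--     return result
-- ===== Notes on version B (the rewrite author's own statement) =====
-- stated objective: simpler
-- what changed: Replaces A's stateful merge (a persistent backward index pointer threaded across the sorted keys with continue/break) by an independent per-key lookup of the rightmost opposite-list value not exceeding the target, so the cross-key pointer state and the index bookkeeping disappear.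
import Mathlib
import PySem

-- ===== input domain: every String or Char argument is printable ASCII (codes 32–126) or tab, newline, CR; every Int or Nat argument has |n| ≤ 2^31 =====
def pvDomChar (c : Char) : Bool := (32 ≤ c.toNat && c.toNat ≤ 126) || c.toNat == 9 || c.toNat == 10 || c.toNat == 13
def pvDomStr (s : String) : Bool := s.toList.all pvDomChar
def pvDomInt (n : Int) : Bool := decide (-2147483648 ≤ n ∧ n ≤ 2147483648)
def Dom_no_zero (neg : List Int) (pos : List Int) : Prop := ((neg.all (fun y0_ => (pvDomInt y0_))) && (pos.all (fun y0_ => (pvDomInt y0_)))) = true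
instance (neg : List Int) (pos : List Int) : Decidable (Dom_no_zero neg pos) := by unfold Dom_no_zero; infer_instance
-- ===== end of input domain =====

-- B replaces A's stateful merge (persistent backward index pointer with continue/break
-- threaded across the sorted keys) by an independent per-key scan for the rightmost
-- opposite value not exceeding the target (objective: simpler).

-- ===== PORT A =====
-- A's length-2 Python lists [i, j] are represented as pairs (i, j).
-- temp-building loop: 'for idx, i in enumerate(xs[:-1]): for _, j in enumerate(xs[idx+1:]): …'
def buildTempA (xs : List Int) : PySem.Dict Int (List (Int × Int)) :=
  (PySem.List.enumerate (PySem.List.slice xs none (some (-1))) 0).foldl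
    (fun temp p =>
      (PySem.List.enumerate (PySem.List.slice xs (some (p.1 + 1)) none) 0).foldl
        (fun temp q =>
          match temp.get? (p.2 + q.2) with
          | none => temp.insert (p.2 + q.2) [(p.2, q.2)]
          | some l => temp.insert (p.2 + q.2) (l ++ [(p.2, q.2)]))
        temp)
    PySem.Dict.empty

-- inner 'for idx in range(k_start_idx, -1, -1)' with continue / break; the pyGet? 'none'
-- branch (IndexError) is unreachable: every generated index lies within range.
def scanA (other : List Int) (t : Int) : List Int → Option (Int × Int)
  | [] => none
  | idx :: rest =>
      match PySem.List.pyGet? other idx with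
      | none => none
      | some k => if k > t then scanA other t rest else some (idx, k)

-- one 'two negative' / 'two positive' block of A (they differ only in the lists' roles
-- and the tuple orientation mk); the 'none' temp.get? branch (KeyError) is unreachable.
def halfA (side other : List Int) (mk : Int → Int → Int → Int × Int × Int)
    (result : PySem.Set (Int × Int × Int)) : PySem.Set (Int × Int × Int) :=
  if 1 < PySem.List.len side then
    let temp := buildTempA side
    ((PySem.List.sorted temp.keys (fun x => x) false).foldl
      (fun st s =>
        match scanA other (-s) (PySem.List.pyRange st.1 (-1) (-1)) with
        | none => st
        | some (idx, k) =>
            (idx,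
             if k = -s then
               match temp.get? s with
               | some l => l.foldl (fun r q => PySem.Set.add r (mk q.1 q.2 k)) st.2
               | none => st.2
             else st.2))
      (PySem.List.len other - 1, result)).2
  else result

def no_zero (neg : List Int) (pos : List Int) : List (Int × Int × Int) :=
  let result : PySem.Set (Int × Int × Int) := PySem.Set.empty
  let result := halfA neg pos (fun i j k => (i, j, k)) result
  halfA pos neg (fun i j k => (k, i, j)) result

-- ===== PORT B =====
-- 'sums.setdefault(side[a] + side[b], []).append(…)'; index a is always in range.
def pairSumsB (side : List Int) : PySem.Dict Int (List (Int × Int)) :=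
  (PySem.List.pyRange 0 (PySem.List.len side - 1) 1).foldl
    (fun sums a =>
      let x := PySem.List.pyGetD side a 0
      (PySem.List.slice side (some (a + 1)) none).foldl
        (fun sums y => (sums.setdefault (x + y) []).modify (x + y) [] (· ++ [(x, y)]))
        sums)
    PySem.Dict.empty

-- '_last_at_most': 'for v in reversed(values): if v <= bound: return v' / 'return None'
def lastAtMostGo : List Int → Int → Option Int
  | [], _ => none
  | v :: rest, b => if v ≤ b then some v else lastAtMostGo rest b

def lastAtMost (values : List Int) (bound : Int) : Option Int :=
  lastAtMostGo values.reverse bound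

-- one result loop of B; 'sums[s]' is ported as getD (KeyError unreachable: s ∈ sums.keys)
def halfB (sums : PySem.Dict Int (List (Int × Int))) (other : List Int)
    (mk : Int → Int → Int → Int × Int × Int)
    (result : PySem.Set (Int × Int × Int)) : PySem.Set (Int × Int × Int) :=
  (PySem.List.sorted sums.keys (fun x => x) false).foldl
    (fun r s =>
      if lastAtMost other (-s) = some (-s) then
        (sums.getD s []).foldl (fun r q => PySem.Set.add r (mk q.1 q.2 (-s))) r
      else r)
    result

def no_zero_alt (neg : List Int) (pos : List Int) : List (Int × Int × Int) :=
  let result : PySem.Set (Int × Int × Int) := PySem.Set.empty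
  let result := halfB (pairSumsB neg) pos (fun i j k => (i, j, k)) result
  halfB (pairSumsB pos) neg (fun i j k => (k, i, j)) result

-- ===== PRECONDITION & SPEC =====
def Spec_no_zero (neg : List Int) (pos : List Int) (out : List (Int × Int × Int)) : Prop := out = no_zero_alt neg pos
instance (neg : List Int) (pos : List Int) (out : List (Int × Int × Int)) : Decidable (Spec_no_zero neg pos out) := by unfold Spec_no_zero; infer_instance

-- ===== CLAIM (what is proved, stated in full; the proofs are below) =====
def Claim_equal_no_zero : Prop := ∀ (neg : List Int) (pos : List Int), Dom_no_zero neg pos → Spec_no_zero neg pos (no_zero neg pos)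

-- ===== LEMMAS AND PROOFS =====

theorem lastAtMostGo_eq_find? (l : List Int) (b : Int) :
    lastAtMostGo l b = l.find? (fun v => decide (v ≤ b)) := by
  induction l with
  | nil => rfl
  | cons v rest ih =>
    unfold lastAtMostGo
    by_cases h : v ≤ b
    · rw [if_pos h, List.find?_cons_of_pos (h := by simpa using h)]
    · rw [if_neg h, List.find?_cons_of_neg (h := by simpa using h), ih]

theorem step_eq (d : PySem.Dict Int (List (Int × Int))) (k : Int) (p : Int × Int) :
    (match d.get? k with
     | none => d.insert k [p]
     | some l => d.insert k (l ++ [p])) =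
    (d.setdefault k []).modify k [] (· ++ [p]) := by
  by_cases hc : d.contains k = true
  · obtain ⟨l, hl⟩ : ∃ l, d.get? k = some l := by
      rw [PySem.Dict.contains_eq_isSome_get?] at hc
      exact Option.isSome_iff_exists.mp hc
    rw [hl]
    rw [PySem.Dict.setdefault_of_contains (h := hc)]
    unfold PySem.Dict.modify
    rw [PySem.Dict.getD_of_get?_eq_some (h := hl)]
  · have hc' : d.contains k = false := by simpa using hc
    have hg : d.get? k = none := by
      rw [PySem.Dict.contains_eq_isSome_get?] at hc'
      simpa using hc'
    rw [hg]
    rw [PySem.Dict.setdefault_of_not_contains (h := hc')]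
    unfold PySem.Dict.modify
    rw [PySem.Dict.getD_insert_self]
    rw [PySem.Dict.insert_insert_self]
    simp

def Good (other : List Int) (t k0 : Int) : Prop :=
  -1 ≤ k0 ∧ k0 < (other.length : Int) ∧
    ∀ (i : Nat) (hi : i < other.length), k0 < (i : Int) → t < other[i]

theorem scan_spec_aux (other : List Int) (t : Int) : ∀ (n : Nat) (k0 : Int),
    (k0 + 1).toNat = n → Good other t k0 →
    (scanA other t (PySem.List.pyRange k0 (-1) (-1)) = none ∧
       other.reverse.find? (fun v => decide (v ≤ t)) = none ∧
       ∀ t' ≤ t, Good other t' k0) ∨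
    (∃ idx k, scanA other t (PySem.List.pyRange k0 (-1) (-1)) = some (idx, k) ∧
       other.reverse.find? (fun v => decide (v ≤ t)) = some k ∧
       ∀ t' ≤ t, Good other t' idx) := by
  intro n
  induction n with
  | zero =>
    intro k0 hn hg
    obtain ⟨h1, h2, h3⟩ := hg
    have hk : k0 = -1 := by omega
    subst hk
    left
    rw [PySem.List.pyRange_neg_one_eq_nil (by omega)]
    refine ⟨rfl, ?_, ?_⟩
    · rw [List.find?_eq_none]
      intro x hx
      rw [List.mem_reverse] at hx
      obtain ⟨i, hi, rfl⟩ := List.mem_iff_getElem.mp hx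
      have := h3 i hi (by omega)
      simpa using by omega
    · intro t' ht'
      refine ⟨by omega, h2, ?_⟩
      intro i hi hlt
      have := h3 i hi hlt
      omega
  | succ n ih =>
    intro k0 hn hg
    obtain ⟨h1, h2, h3⟩ := hg
    have hk0 : 0 ≤ k0 := by omega
    rw [PySem.List.pyRange_neg_one_cons (by omega)]
    have hget : PySem.List.pyGet? other k0 = some (other[k0.toNat]'(by omega)) :=
      PySem.List.pyGet?_eq_some_getElem other hk0 (by exact_mod_cast h2)
    unfold scanA
    rw [hget]
    by_cases hgt : other[k0.toNat]'(by omega) > t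
    · simp only [hgt, if_true]
      have hg' : Good other t (k0 - 1) := by
        refine ⟨by omega, by omega, ?_⟩
        intro i hi hlt
        by_cases hik : (i : Int) = k0
        · have : i = k0.toNat := by omega
          subst this; exact hgt
        · exact h3 i hi (by omega)
      rcases ih (k0 - 1) (by omega) hg' with ⟨ha, hb, hc⟩ | ⟨idx, k, ha, hb, hc⟩
      · left
        refine ⟨ha, hb, ?_⟩
        intro t' ht'
        obtain ⟨c1, c2, c3⟩ := hc t' ht'
        exact ⟨by omega, h2, fun i hi hlt => c3 i hi (by omega)⟩
      · exact Or.inr ⟨idx, k, ha, hb, hc⟩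
    · simp only [hgt, if_false]
      right
      refine ⟨k0, (other[k0.toNat]'(by omega)), rfl, ?_, ?_⟩
      · -- find? over reverse hits index k0 first
        have hdecomp : other.reverse =
            (other.drop (k0.toNat + 1)).reverse ++
              other[k0.toNat]'(by omega) :: (other.take k0.toNat).reverse := by
          conv_lhs => rw [← List.take_append_drop (k0.toNat + 1) other]
          rw [List.reverse_append]
          congr 1
          rw [List.take_add_one, List.getElem?_eq_getElem (by omega)]
          simp
        rw [hdecomp, List.find?_append]
        have hnone : (other.drop (k0.toNat + 1)).reverse.find?
            (fun v => decide (v ≤ t)) = none := by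
          rw [List.find?_eq_none]
          intro x hx
          rw [List.mem_reverse] at hx
          obtain ⟨i, hi, rfl⟩ := List.mem_iff_getElem.mp hx
          rw [List.getElem_drop]
          have hlen : i < other.length - (k0.toNat + 1) := by simpa using hi
          have := h3 (k0.toNat + 1 + i) (by omega) (by push_cast; omega)
          simpa using by omega
        rw [hnone, Option.none_or]
        rw [List.find?_cons_of_pos (h := by simpa using by omega)]
      · intro t' ht'
        refine ⟨by omega, by omega, ?_⟩
        intro i hi hlt
        have := h3 i hi hlt
        omega

theorem scan_spec (other : List Int) (t k0 : Int) (hg : Good other t k0) :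
    (scanA other t (PySem.List.pyRange k0 (-1) (-1)) = none ∧
       other.reverse.find? (fun v => decide (v ≤ t)) = none ∧
       ∀ t' ≤ t, Good other t' k0) ∨
    (∃ idx k, scanA other t (PySem.List.pyRange k0 (-1) (-1)) = some (idx, k) ∧
       other.reverse.find? (fun v => decide (v ≤ t)) = some k ∧
       ∀ t' ≤ t, Good other t' idx) :=
  scan_spec_aux other t _ k0 rfl hg

theorem foldl_enumerate_snd {β : Type} (l : List Int) (f : β → Int → β) (init : β) :
    (PySem.List.enumerate l 0).foldl (fun t q => f t q.2) init = l.foldl f init := by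
  conv_rhs => rw [← PySem.List.map_snd_enumerate l 0]
  rw [List.foldl_map]

theorem temp_eq (xs : List Int) : buildTempA xs = pairSumsB xs := by
  by_cases hnil : xs = []
  · subst hnil; rfl
  have hlen : 1 ≤ xs.length := by
    cases xs with
    | nil => exact absurd rfl hnil
    | cons a l => simp
  unfold buildTempA pairSumsB
  rw [PySem.List.slice_to_neg_one]
  rw [PySem.List.enumerate_eq_map_pyRange (d := 0)]
  rw [List.foldl_map]
  have hlen2 : PySem.List.len xs.dropLast = PySem.List.len xs - 1 := by
    simp only [PySem.List.len_eq, List.length_dropLast]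
    omega
  rw [hlen2]
  apply PySem.List.foldl_congr_mem
  intro temp a ha
  rw [PySem.List.mem_pyRange_one] at ha
  rw [PySem.List.len_eq] at ha
  dsimp only
  have hi_eq : PySem.List.pyGetD xs.dropLast a 0 = PySem.List.pyGetD xs a 0 := by
    rw [PySem.List.pyGetD_eq_getElem (h0 := ha.1)
        (h1 := by simp only [List.length_dropLast] at ha ⊢; omega)]
    rw [PySem.List.pyGetD_eq_getElem (h0 := ha.1) (h1 := by omega)]
    exact List.getElem_dropLast _
  rw [hi_eq]
  rw [PySem.List.slice_from xs (by omega : (0:Int) ≤ a + 1)]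
  refine Eq.trans (foldl_enumerate_snd (List.drop (a + 1).toNat xs)
    (fun temp jv =>
      match temp.get? (PySem.List.pyGetD xs a 0 + jv) with
      | none => temp.insert (PySem.List.pyGetD xs a 0 + jv) [(PySem.List.pyGetD xs a 0, jv)]
      | some l => temp.insert (PySem.List.pyGetD xs a 0 + jv)
          (l ++ [(PySem.List.pyGetD xs a 0, jv)]))
    temp) ?_
  apply PySem.List.foldl_congr_mem
  intro d jv _
  exact step_eq d (PySem.List.pyGetD xs a 0 + jv) (PySem.List.pyGetD xs a 0, jv)

theorem fold_half (temp : PySem.Dict Int (List (Int × Int))) (other : List Int)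
    (mk : Int → Int → Int → Int × Int × Int) :
    ∀ (keys : List Int), keys.Pairwise (· ≤ ·) →
    ∀ (k0 : Int) (res : PySem.Set (Int × Int × Int)), (∀ s ∈ keys, Good other (-s) k0) →
    (keys.foldl
      (fun st s =>
        match scanA other (-s) (PySem.List.pyRange st.1 (-1) (-1)) with
        | none => st
        | some (idx, k) =>
            (idx,
             if k = -s then
               match temp.get? s with
               | some l => l.foldl (fun r q => PySem.Set.add r (mk q.1 q.2 k)) st.2
               | none => st.2
             else st.2))
      (k0, res)).2 =
    keys.foldl
      (fun r s =>
        if lastAtMost other (-s) = some (-s) then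
          (temp.getD s []).foldl (fun r q => PySem.Set.add r (mk q.1 q.2 (-s))) r
        else r)
      res := by
  intro keys
  induction keys with
  | nil => intro _ k0 res _; rfl
  | cons s rest ih =>
    intro hpw k0 res hG
    obtain ⟨hp, hrest⟩ := List.pairwise_cons.mp hpw
    have hGs : Good other (-s) k0 := hG s (by simp)
    have hlam : lastAtMost other (-s) =
        other.reverse.find? (fun v => decide (v ≤ -s)) := by
      unfold lastAtMost
      exact lastAtMostGo_eq_find? other.reverse (-s)
    rcases scan_spec other (-s) k0 hGs with ⟨hscan, hfind, hprop⟩ | ⟨idx, k, hscan, hfind, hprop⟩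
    · have hcond : ¬ lastAtMost other (-s) = some (-s) := by
        rw [hlam, hfind]; simp
      simp only [List.foldl_cons, hscan, hcond, if_false]
      exact ih hrest k0 res (fun s' hs' => hprop (-s') (by have := hp s' hs'; omega))
    · simp only [List.foldl_cons, hscan]
      by_cases hk : k = -s
      · have hcond : lastAtMost other (-s) = some (-s) := by
          rw [hlam, hfind, hk]
        simp only [hk, hcond, if_pos]
        have hbody :
            (match temp.get? s with
             | some l => l.foldl (fun r q => PySem.Set.add r (mk q.1 q.2 (-s))) res
             | none => res) =
            (temp.getD s []).foldl (fun r q => PySem.Set.add r (mk q.1 q.2 (-s))) res := by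
          cases hget : temp.get? s with
          | none => rw [PySem.Dict.getD_of_get?_eq_none (h := hget)]; rfl
          | some l => rw [PySem.Dict.getD_of_get?_eq_some (h := hget)]
        rw [hbody]
        exact ih hrest idx _ (fun s' hs' => hprop (-s') (by have := hp s' hs'; omega))
      · have hcond : ¬ lastAtMost other (-s) = some (-s) := by
          rw [hlam, hfind]
          simp only [Option.some.injEq]
          exact fun h => hk h
        simp only [hk, if_false, hcond]
        exact ih hrest idx res (fun s' hs' => hprop (-s') (by have := hp s' hs'; omega))

theorem half_eq (side other : List Int) (mk : Int → Int → Int → Int × Int × Int)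
    (result : PySem.Set (Int × Int × Int)) :
    halfA side other mk result = halfB (pairSumsB side) other mk result := by
  unfold halfA halfB
  by_cases h : 1 < PySem.List.len side
  · simp only [h, if_true]
    rw [temp_eq]
    have hpw : (PySem.List.sorted (pairSumsB side).keys (fun x => x) false).Pairwise (· ≤ ·) := by
      simpa using PySem.List.sorted_pairwise (xs := (pairSumsB side).keys) (key := fun x => x)
    refine fold_half (pairSumsB side) other mk _ hpw _ result ?_
    intro s _
    rw [PySem.List.len_eq]
    refine ⟨by omega, by omega, ?_⟩
    intro i hi hlt
    exfalso
    omega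
  · simp only [h, if_false]
    have hps : pairSumsB side = PySem.Dict.empty := by
      unfold pairSumsB
      rw [PySem.List.len_eq] at h ⊢
      rw [PySem.List.pyRange_one_eq_nil (by omega)]
      rfl
    rw [hps]
    simp [PySem.Dict.keys_empty]

-- ===== VERDICT (by name: the statement is the Claim_ definition above) =====
theorem no_zero_spec : Claim_equal_no_zero := by
  intro neg pos _
  unfold Spec_no_zero no_zero no_zero_alt
  rw [half_eq, half_eq]
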